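-- pv_equiv track=rewrite | github.com/presMart/LeetCode-Exercises | LeetCode Intro/steps_to_zero_1342.py | explainedBitwiseNumberOfSteps
-- ===== SOURCE A (Python) =====
-- def explainedBitwiseNumberOfSteps(num: int) -> int:
--     if num == 0:
--         return 0
--     bin_num = bin(num)[2:]
--     # The easier to read version:
--     steps = 0
--
--     for bit in bin_num:
--         # Must use "1", not 1 here. The bits are strings!
--         if bit == "1":  # If the bit is a 1
--             steps = steps + 2  # Then it'll take 2 to remove.
--         else:  # bit == "0"
--             steps = steps + 1  # Then it'll take 1 to remove.
--
--         # We need to subtract 1, because the last bit was over-counted.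
--     return steps - 1
-- ===== SOURCE B (Python) =====
-- def explainedBitwiseNumberOfSteps(num: int) -> int:
--     if num == 0:
--         return 0
--     steps = 0
--     while num:
--         steps += 1
--         if num & 1:
--             num -= 1
--         else:
--             num >>= 1
--     return steps
-- ===== Notes on version B (the rewrite author's own statement) =====
-- stated objective: alternative
-- what changed: B simulates the reduction directly on the integer with bit operations (subtract 1 when odd, shift right when even, counting each step) instead of building bin(num)[2:] and scanning its characters.
-- outside the precondition, e.g. on explainedBitwiseNumberOfSteps(-5): A returns 5, B does not finish within the time limit
import Mathlib
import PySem

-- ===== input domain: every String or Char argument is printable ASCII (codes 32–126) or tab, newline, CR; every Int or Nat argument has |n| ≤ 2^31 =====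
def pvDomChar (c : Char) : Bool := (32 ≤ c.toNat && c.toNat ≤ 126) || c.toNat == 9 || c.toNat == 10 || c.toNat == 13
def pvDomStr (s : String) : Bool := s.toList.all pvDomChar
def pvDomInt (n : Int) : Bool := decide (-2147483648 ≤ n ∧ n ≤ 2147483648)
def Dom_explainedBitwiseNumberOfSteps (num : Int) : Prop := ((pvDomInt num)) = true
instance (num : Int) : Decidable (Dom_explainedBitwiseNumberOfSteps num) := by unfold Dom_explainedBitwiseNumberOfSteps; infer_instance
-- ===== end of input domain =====

-- B simulates the reduction directly on the integer with bit operations instead of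
-- scanning the characters of bin(num)[2:]; objective: alternative (same cost, no string).

-- ===== PORT A =====
-- bin(n)[2:] for n > 0: the binary digits, most significant first.
def pvBinChars (n : Nat) : List Char :=
  if n = 0 then []
  else pvBinChars (n / 2) ++ [if n % 2 = 1 then '1' else '0']
decreasing_by exact Nat.div_lt_self (Nat.pos_of_ne_zero (by assumption)) (by norm_num)

def explainedBitwiseNumberOfSteps (num : Int) : Int :=
  if num = 0 then 0
  else
    -- bin(num)[2:]: for negative num Python gives 'b' followed by the digits of |num|
    let bin_num : List Char :=
      if num < 0 then 'b' :: pvBinChars (-num).toNat else pvBinChars num.toNat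
    let steps : Int :=
      bin_num.foldl (fun steps bit => if bit = '1' then steps + 2 else steps + 1) 0
    steps - 1

-- ===== PORT B =====
-- while num: steps += 1; if num & 1: num -= 1 else: num >>= 1   (runs on the Nat value;
-- the Python loop only terminates for num ≥ 0, which Pre_ guarantees)
def pvLoopB (n : Nat) (steps : Int) : Int :=
  if n = 0 then steps
  else if n % 2 = 1 then pvLoopB (n - 1) (steps + 1)
  else pvLoopB (n / 2) (steps + 1)
termination_by n
decreasing_by
  · exact Nat.sub_lt (Nat.pos_of_ne_zero (by assumption)) (by norm_num)
  · exact Nat.div_lt_self (Nat.pos_of_ne_zero (by assumption)) (by norm_num)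

def explainedBitwiseNumberOfSteps_alt (num : Int) : Int :=
  if num = 0 then 0 else pvLoopB num.toNat 0

-- ===== PRECONDITION & SPEC =====
-- Pre_ excludes negative inputs: there A scans the garbage string 'b101'-style slice of
-- bin(num) and returns an accidental value, while B's while-loop never terminates (B raises
-- no value at all); the natural domain of the task is num ≥ 0.
def Pre_explainedBitwiseNumberOfSteps (num : Int) : Prop := 0 ≤ num
instance (num : Int) : Decidable (Pre_explainedBitwiseNumberOfSteps num) := by
  unfold Pre_explainedBitwiseNumberOfSteps; infer_instance

def pvWitness_explainedBitwiseNumberOfSteps : Int := 41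

def Spec_explainedBitwiseNumberOfSteps (num : Int) (out : Int) : Prop :=
  out = explainedBitwiseNumberOfSteps_alt num
instance (num : Int) (out : Int) : Decidable (Spec_explainedBitwiseNumberOfSteps num out) := by
  unfold Spec_explainedBitwiseNumberOfSteps; infer_instance

-- ===== CLAIM =====
def Claim_equal_explainedBitwiseNumberOfSteps : Prop :=
  ∀ (num : Int), Dom_explainedBitwiseNumberOfSteps num →
    Pre_explainedBitwiseNumberOfSteps num →
    Spec_explainedBitwiseNumberOfSteps num (explainedBitwiseNumberOfSteps num)

-- ===== LEMMAS AND PROOFS =====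

-- unfolding lemmas for B's loop
theorem pvLoopB_zero (s : Int) : pvLoopB 0 s = s := by
  rw [pvLoopB.eq_def]; simp

theorem pvLoopB_odd (n : Nat) (s : Int) (h0 : n ≠ 0) (h1 : n % 2 = 1) :
    pvLoopB n s = pvLoopB (n - 1) (s + 1) := by
  conv_lhs => rw [pvLoopB.eq_def]
  simp [h0, h1]

theorem pvLoopB_even (n : Nat) (s : Int) (h0 : n ≠ 0) (h1 : ¬ n % 2 = 1) :
    pvLoopB n s = pvLoopB (n / 2) (s + 1) := by
  conv_lhs => rw [pvLoopB.eq_def]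
  simp [h0, h1]

-- accumulator shift for B's loop
theorem pvLoopB_shift (n : Nat) : ∀ s : Int, pvLoopB n s = s + pvLoopB n 0 := by
  induction n using Nat.strong_induction_on with
  | _ n ih =>
    intro s
    by_cases h0 : n = 0
    · subst h0; rw [pvLoopB_zero, pvLoopB_zero]; ring
    · by_cases h1 : n % 2 = 1
      · have hlt : n - 1 < n := Nat.sub_lt (Nat.pos_of_ne_zero h0) (by norm_num)
        rw [pvLoopB_odd n s h0 h1, pvLoopB_odd n 0 h0 h1,
            ih _ hlt (s + 1), ih _ hlt (0 + 1)]
        ring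
      · have hlt : n / 2 < n := Nat.div_lt_self (Nat.pos_of_ne_zero h0) (by norm_num)
        rw [pvLoopB_even n s h0 h1, pvLoopB_even n 0 h0 h1,
            ih _ hlt (s + 1), ih _ hlt (0 + 1)]
        ring

-- the fold over the binary digits equals the loop count plus one
theorem pvFold_binChars (n : Nat) (hn : n ≠ 0) : ∀ s : Int,
    (pvBinChars n).foldl (fun steps bit => if bit = '1' then steps + 2 else steps + 1) s
      = s + pvLoopB n 0 + 1 := by
  induction n using Nat.strong_induction_on with
  | _ n ih =>
    intro s
    rw [pvBinChars]
    simp only [if_neg hn, List.foldl_append]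
    by_cases h2 : n / 2 = 0
    · -- n = 1
      have h1 : n = 1 := by omega
      subst h1
      rw [pvLoopB_odd 1 0 (by norm_num) (by norm_num)]
      simp [pvBinChars, pvLoopB_zero, List.foldl]
      ring
    · have hlt : n / 2 < n := Nat.div_lt_self (Nat.pos_of_ne_zero hn) (by norm_num)
      rw [ih _ hlt h2 s]
      by_cases h1 : n % 2 = 1
      · have hB : pvLoopB n 0 = 2 + pvLoopB (n / 2) 0 := by
          have hn1 : n - 1 ≠ 0 := by omega
          have he : ¬ (n - 1) % 2 = 1 := by omega
          have hq : (n - 1) / 2 = n / 2 := by omega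
          rw [pvLoopB_odd n 0 hn h1, pvLoopB_even (n - 1) (0 + 1) hn1 he, hq,
              pvLoopB_shift (n / 2) (0 + 1 + 1)]
          ring
        simp only [h1, List.foldl]
        rw [hB]; norm_num; ring
      · have hB : pvLoopB n 0 = 1 + pvLoopB (n / 2) 0 := by
          rw [pvLoopB_even n 0 hn h1, pvLoopB_shift (n / 2) (0 + 1)]
          ring
        have hc : (if n % 2 = 1 then '1' else '0') = '0' := by simp [h1]
        rw [hc]
        simp only [List.foldl]
        rw [if_neg (by decide : ¬ ('0' : Char) = '1'), hB]
        ring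

-- ===== VERDICT =====
theorem explainedBitwiseNumberOfSteps_spec : Claim_equal_explainedBitwiseNumberOfSteps := by
  intro num _ hpre
  unfold Spec_explainedBitwiseNumberOfSteps explainedBitwiseNumberOfSteps explainedBitwiseNumberOfSteps_alt
  by_cases h0 : num = 0
  · simp [h0]
  · have hpos : 0 < num := lt_of_le_of_ne hpre (Ne.symm h0)
    have hneg : ¬ num < 0 := by omega
    have hnz : num.toNat ≠ 0 := by omega
    simp only [if_neg h0, if_neg hneg]
    rw [pvFold_binChars num.toNat hnz 0]
    ring
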